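-- pv_equiv track=rewrite | github.com/AdamKure/Advent_of_code | 2023/Day_13.py | find_symetry
-- ===== SOURCE A (Python) =====
-- from typing import Dict, List, Tuple
--
-- def find_symetry(pattern: str, positions: List[int] = None) -> int:
--     if positions is None:
--         positions = range(1, len(pattern))
--     cols = len(pattern)
--     symetries = []
--     for pos in positions:
--         pos_left = pos - 1
--         pos_right = pos
--         is_symetric = True
--         while 0 <= pos_left < cols - 1 and 1 <= pos_right < cols:
--             if pattern[pos_left] != pattern[pos_right]:
--                 is_symetric = False
--                 break
--             pos_left -= 1
--             pos_right += 1
--         if is_symetric: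
--             symetries.append(pos)
--     return symetries
-- ===== SOURCE B (Python) =====
-- def find_symetry(pattern: str, positions=None):
--     cols = len(pattern)
--     if positions is None:
--         positions = range(1, cols)
--
--     def mirror(pos):
--         if pos <= 0 or pos >= cols:
--             return True  # empty overlap: trivially symmetric (same as A)
--         m = min(pos, cols - pos)
--         return pattern[pos - m:pos][::-1] == pattern[pos:pos + m]
--
--     return [pos for pos in positions if mirror(pos)]
-- ===== Notes on version B (the rewrite author's own statement) =====
-- stated objective: alternative
-- what changed: B decides each mirror position by one whole-slice comparison (reversed left slice of length min(pos, cols-pos) against the right slice) and a list comprehension, instead of A's two-pointer character-by-character expansion loop with an early break.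
import Mathlib
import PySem

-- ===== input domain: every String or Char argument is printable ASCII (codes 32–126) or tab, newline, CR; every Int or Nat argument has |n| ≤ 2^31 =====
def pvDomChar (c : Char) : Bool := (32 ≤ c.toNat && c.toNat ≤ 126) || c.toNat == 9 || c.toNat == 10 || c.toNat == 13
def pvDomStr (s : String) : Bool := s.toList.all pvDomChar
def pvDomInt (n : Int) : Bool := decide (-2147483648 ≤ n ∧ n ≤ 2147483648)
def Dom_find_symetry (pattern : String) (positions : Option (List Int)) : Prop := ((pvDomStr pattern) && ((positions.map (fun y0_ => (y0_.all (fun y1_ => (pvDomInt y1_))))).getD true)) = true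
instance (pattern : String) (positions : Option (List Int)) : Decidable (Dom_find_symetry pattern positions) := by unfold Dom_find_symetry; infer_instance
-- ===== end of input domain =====

-- B replaces A's two-pointer expansion loop by a whole-slice reverse comparison per position (objective: alternative decomposition, same results).

-- ===== PORT A =====
-- A's while loop; the guard guarantees both indices are in range, so pyGetD is exact here.
def aLoop (cs : List Char) (cols l r : Int) : Bool :=
  if h : 0 ≤ l ∧ l < cols - 1 ∧ 1 ≤ r ∧ r < cols then
    if PySem.List.pyGetD cs l ' ' ≠ PySem.List.pyGetD cs r ' ' then false
    else aLoop cs cols (l - 1) (r + 1)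
  else true
termination_by (cols - r).toNat
decreasing_by omega

def find_symetry (pattern : String) (positions : Option (List Int)) : List Int :=
  let cs := pattern.toList
  let cols : Int := cs.length
  let ps : List Int := match positions with
    | none => PySem.List.pyRange 1 cols 1
    | some l => l
  ps.foldl (fun acc pos => if aLoop cs cols (pos - 1) pos then acc ++ [pos] else acc) []

-- ===== PORT B =====
-- pattern[pos-m:pos][::-1] == pattern[pos:pos+m]; [::-1] is List.reverse (PySem.List.slice?_none_none_neg_one).
def bMirror (cs : List Char) (cols pos : Int) : Bool :=
  if pos ≤ 0 ∨ cols ≤ pos then true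
  else
    let m := min pos (cols - pos)
    (PySem.List.slice cs (some (pos - m)) (some pos)).reverse == PySem.List.slice cs (some pos) (some (pos + m))

def find_symetry_alt (pattern : String) (positions : Option (List Int)) : List Int :=
  let cs := pattern.toList
  let cols : Int := cs.length
  let ps : List Int := match positions with
    | none => PySem.List.pyRange 1 cols 1
    | some l => l
  ps.filter (fun pos => bMirror cs cols pos)

-- ===== PRECONDITION & SPEC =====
def Spec_find_symetry (pattern : String) (positions : Option (List Int)) (out : List Int) : Prop := out = find_symetry_alt pattern positions
instance (pattern : String) (positions : Option (List Int)) (out : List Int) : Decidable (Spec_find_symetry pattern positions out) := by unfold Spec_find_symetry; infer_instance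

-- ===== CLAIM (what is proved, stated in full; the proofs are below) =====
def Claim_equal_find_symetry : Prop := ∀ (pattern : String) (positions : Option (List Int)), Dom_find_symetry pattern positions → Spec_find_symetry pattern positions (find_symetry pattern positions)

-- ===== LEMMAS AND PROOFS =====

/-- Common characterisation: the first `n` mirrored pairs around `(l, r)` agree. -/
def symN (cs : List Char) (l r : Int) (n : Nat) : Prop :=
  ∀ k : Nat, k < n → PySem.List.pyGetD cs (l - k) ' ' = PySem.List.pyGetD cs (r + k) ' '

lemma symN_zero (cs : List Char) (l r : Int) : symN cs l r 0 := by
  intro k hk; omega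

lemma symN_succ (cs : List Char) (l r : Int) (n : Nat) :
    symN cs l r (n + 1) ↔ PySem.List.pyGetD cs l ' ' = PySem.List.pyGetD cs r ' ' ∧ symN cs (l - 1) (r + 1) n := by
  constructor
  · intro h
    refine ⟨by simpa using h 0 (by omega), fun k hk => ?_⟩
    have := h (k + 1) (by omega)
    have e1 : l - 1 - (k : Int) = l - ((k : Nat) + 1 : Nat) := by push_cast; ring
    have e2 : r + 1 + (k : Int) = r + ((k : Nat) + 1 : Nat) := by push_cast; ring
    rw [e1, e2]; exact this
  · rintro ⟨h0, h⟩ k hk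
    cases k with
    | zero => simpa using h0
    | succ k =>
      have := h k (by omega)
      have e1 : l - ((k + 1 : Nat) : Int) = l - 1 - k := by push_cast; ring
      have e2 : r + ((k + 1 : Nat) : Int) = r + 1 + k := by push_cast; ring
      rw [e1, e2]; exact this

lemma aLoop_iff (cs : List Char) (cols l r : Int) :
    l < r → (aLoop cs cols l r = true ↔ symN cs l r (min (l + 1) (cols - r)).toNat) := by
  induction l, r using aLoop.induct cs cols with
  | case1 l r h hne =>
    intro hlr
    rw [aLoop, dif_pos h, if_pos hne]
    constructor
    · intro hfalse; exact absurd hfalse (by simp)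
    · intro hsym
      have := hsym 0 (by omega)
      simp only [Nat.cast_zero, sub_zero, add_zero] at this
      exact absurd this hne
  | case2 l r h heq ih =>
    intro hlr
    rw [aLoop, dif_pos h, if_neg heq]
    simp only [ne_eq, not_not] at heq
    have ih' := ih (by omega)
    have hmin : (min (l + 1) (cols - r)).toNat = (min (l - 1 + 1) (cols - (r + 1))).toNat + 1 := by
      omega
    rw [ih', hmin, symN_succ]
    constructor
    · intro hs; exact ⟨heq, hs⟩
    · rintro ⟨-, hs⟩; exact hs
  | case3 l r h =>
    intro hlr
    rw [aLoop, dif_neg h]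
    have hn : (min (l + 1) (cols - r)).toNat = 0 := by omega
    rw [hn]
    simp [symN_zero]

lemma rev_seg_iff (cs : List Char) (p mm : Nat) (hmp : mm ≤ p) (hL : p + mm ≤ cs.length) :
    (((cs.drop (p - mm)).take mm).reverse = (cs.drop p).take mm) ↔
      ∀ k : Nat, k < mm → cs[p - 1 - k]? = cs[p + k]? := by
  have l1 : ((cs.drop (p - mm)).take mm).length = mm := by
    simp only [List.length_take, List.length_drop]
    omega
  have l2 : ((cs.drop p).take mm).length = mm := by
    simp only [List.length_take, List.length_drop]
    omega
  have gtake : ∀ (l : List Char) (n i : Nat), i < n → (l.take n)[i]? = l[i]? := by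
    intro l n i h
    rw [List.getElem?_take]
    simp [h]
  constructor
  · intro heq k hk
    have hthis := congrArg (fun l => l[k]?) heq
    simp only at hthis
    rw [List.getElem?_reverse (by rw [l1]; exact hk), l1] at hthis
    rw [gtake _ _ _ (by omega), List.getElem?_drop] at hthis
    rw [gtake _ _ _ hk, List.getElem?_drop] at hthis
    rw [show p - mm + (mm - 1 - k) = p - 1 - k by omega] at hthis
    exact hthis
  · intro h
    apply List.ext_getElem?
    intro i
    by_cases hi : i < mm
    · rw [List.getElem?_reverse (by rw [l1]; exact hi), l1]
      rw [gtake _ _ _ (by omega), List.getElem?_drop]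
      rw [gtake _ _ _ hi, List.getElem?_drop]
      rw [show p - mm + (mm - 1 - i) = p - 1 - i by omega]
      exact h i hi
    · rw [List.getElem?_eq_none (by simp only [List.length_reverse, l1]; omega),
          List.getElem?_eq_none (by rw [l2]; omega)]

lemma bMirror_iff (cs : List Char) (pos : Int) (h0 : 0 < pos) (h1 : pos < (cs.length : Int)) :
    bMirror cs (cs.length) pos = true ↔
      symN cs (pos - 1) pos (min pos ((cs.length : Int) - pos)).toNat := by
  unfold bMirror
  rw [if_neg (by omega)]
  simp only [beq_iff_eq]
  set m : Int := min pos ((cs.length : Int) - pos) with hmdef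
  obtain ⟨mm, hmm⟩ : ∃ mm : Nat, (mm : Int) = m := ⟨m.toNat, by omega⟩
  obtain ⟨p, hp⟩ : ∃ p : Nat, (p : Int) = pos := ⟨pos.toNat, by omega⟩
  have hfacts : mm ≤ p ∧ 1 ≤ p ∧ p + mm ≤ cs.length ∧ 1 ≤ mm := by omega
  have e1 : PySem.List.slice cs (some (pos - m)) (some pos) = (cs.drop (p - mm)).take mm := by
    rw [PySem.List.slice_toNat cs (by omega : (0:Int) ≤ pos - m) (by omega : (0:Int) ≤ pos)]
    rw [show (pos - m).toNat = p - mm by omega, show pos.toNat = p by omega,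
        show p - (p - mm) = mm by omega]
  have e2 : PySem.List.slice cs (some pos) (some (pos + m)) = (cs.drop p).take mm := by
    rw [PySem.List.slice_toNat cs (by omega : (0:Int) ≤ pos) (by omega : (0:Int) ≤ pos + m)]
    rw [show pos.toNat = p by omega, show (pos + m).toNat = p + mm by omega,
        show p + mm - p = mm by omega]
  rw [e1, e2, show m.toNat = mm by omega]
  rw [rev_seg_iff cs p mm (by omega) (by omega)]
  unfold symN
  refine forall_congr' fun k => imp_congr_right fun hk => ?_
  rw [PySem.List.pyGetD_eq_getElem cs ' ' (by omega) (by omega),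
      PySem.List.pyGetD_eq_getElem cs ' ' (by omega) (by omega)]
  simp only [show (pos - 1 - (k : Int)).toNat = p - 1 - k by omega,
      show (pos + (k : Int)).toNat = p + k by omega]
  rw [List.getElem?_eq_getElem (by omega), List.getElem?_eq_getElem (by omega), Option.some_inj]

lemma mirror_eq (cs : List Char) (pos : Int) :
    aLoop cs (cs.length) (pos - 1) pos = bMirror cs (cs.length) pos := by
  by_cases hin : 0 < pos ∧ pos < (cs.length : Int)
  · obtain ⟨h0, h1⟩ := hin
    have hA := aLoop_iff cs (cs.length) (pos - 1) pos (by omega)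
    have hB := bMirror_iff cs pos h0 h1
    have : pos - 1 + 1 = pos := by ring
    rw [this] at hA
    rw [← Bool.coe_iff_coe, hA, hB]
  · -- out of range: both trivially true
    rw [aLoop, bMirror]
    rw [dif_neg (by omega), if_pos (by omega)]

-- ===== VERDICT (by name: the statement is the Claim_ definition above) =====
theorem find_symetry_spec : Claim_equal_find_symetry := by
  intro pattern positions _
  unfold Spec_find_symetry find_symetry find_symetry_alt
  simp only
  rw [PySem.List.foldl_append_if_eq_filter]
  simp only [List.nil_append]
  congr 1
  funext pos
  exact mirror_eq pattern.toList pos
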